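-- pv_equiv track=rewrite | github.com/unixsysdev/llmflow | llmflow/molecules/optimization.py | _extract_component_name
-- ===== SOURCE A (Python) =====
-- def _extract_component_name(component_code: str) -> str:
--     """Extract component name from code."""
--     lines = component_code.split('\n')
--     for line in lines:
--         if line.strip().startswith('class '):
--             return line.strip().split()[1].split('(')[0]
--         elif line.strip().startswith('def '):
--             return line.strip().split()[1].split('(')[0]
--
--     return "unknown_component"
-- ===== SOURCE B (Python) =====
-- def _extract_component_name(component_code: str) -> str:
--     """Single left-to-right scan over the raw string with index arithmetic:
--     no line splitting, no strip/split pipeline."""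
--     s = component_code
--     n = len(s)
--     i = 0  # invariant: i is the start of a line
--     while i < n:
--         j = i
--         while j < n and s[j] in ' \t\r':
--             j += 1
--         for kw in ('class ', 'def '):
--             if s.startswith(kw, j):
--                 k = j + len(kw)
--                 while k < n and s[k] in ' \t\r':
--                     k += 1
--                 m = k
--                 while m < n and s[m] not in ' \t\r\n':
--                     m += 1
--                 if m > k:
--                     name = s[k:m]
--                     p = name.find('(')
--                     return name if p < 0 else name[:p]
--         while i < n and s[i] != '\n':
--             i += 1
--         i += 1
--     return "unknown_component"
-- ===== Notes on version B (the rewrite author's own statement) =====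
-- stated objective: alternative
-- what changed: B replaces A's split-into-lines/strip/startswith/split()-tokenise pipeline by a single left-to-right index scan over the raw string that skips blanks, matches the keyword in place and slices the name out directly, building no intermediate line or token lists.
import Mathlib
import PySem

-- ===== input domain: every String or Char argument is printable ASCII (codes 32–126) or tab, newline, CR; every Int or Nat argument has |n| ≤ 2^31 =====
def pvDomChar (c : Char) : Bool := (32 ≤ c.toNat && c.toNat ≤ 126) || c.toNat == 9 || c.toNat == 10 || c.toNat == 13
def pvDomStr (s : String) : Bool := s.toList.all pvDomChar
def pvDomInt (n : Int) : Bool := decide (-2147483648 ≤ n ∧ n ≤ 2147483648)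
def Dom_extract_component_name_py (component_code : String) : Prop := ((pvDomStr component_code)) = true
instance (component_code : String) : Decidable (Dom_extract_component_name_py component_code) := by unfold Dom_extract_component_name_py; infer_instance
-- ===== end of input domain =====

-- B replaces A's split('\n')/strip()/split() pipeline by a single left-to-right scan of the raw
-- string (one pass, no intermediate line/token lists): an alternative of similar cost.


-- ===== PORT A =====
-- the Python string literals 'class ' and 'def ' as char lists (shared by both ports)
def pyKwClass : List Char := ['c', 'l', 'a', 's', 's', ' ']
def pyKwDef : List Char := ['d', 'e', 'f', ' ']

-- line.strip().split()[1].split('(')[0].  Index [1] never raises when the guard held (a stripped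
-- line starting with 'class '/'def ' has a second word — proved below in pvKwLemma); the [] in
-- the unreachable branch stands for Python's IndexError.  split('(') is never empty, so headD []
-- is exactly [0].
def pyExtractTok (st : List Char) : List Char :=
  match PySem.Chars.split₀ st with
  | _ :: t :: _ => (PySem.Chars.splitOn t ['(']).headD []
  | _ => []

-- the 'for line in lines' loop
def aGo : List (List Char) → String
  | [] => "unknown_component"
  | l :: ls =>
    let st := PySem.Chars.strip l
    if PySem.Chars.startswith st (pyKwClass) then String.ofList (pyExtractTok st)
    else if PySem.Chars.startswith st (pyKwDef) then String.ofList (pyExtractTok st)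
    else aGo ls

def extract_component_name_py (component_code : String) : String :=
  aGo (PySem.Chars.splitOn component_code.toList ['\n'])

-- ===== PORT B =====
-- Source B: a single index scan over the raw string; the index loops become the obvious
-- takeWhile/dropWhile recursions on the char-list suffix.
def bBlank (c : Char) : Bool := c = ' ' || c = '\t' || c = '\r'

-- the body of Source B's `for kw in (…)`: s.startswith(kw, j), the k and m loops, the m > k test,
-- name.find('(') and name[:p]
def bTry (kw : List Char) (t : List Char) : Option (List Char) :=
  if kw.isPrefixOf t then
    let r := (t.drop kw.length).dropWhile bBlank
    let name := r.takeWhile (fun c => !(bBlank c || c = '\n'))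
    if name.isEmpty then none
    else
      let p := PySem.Chars.find name ['(']
      some (if p < 0 then name else name.take p.toNat)
  else none

-- the outer `while i < n` loop: cs is the suffix starting at the current line start
def bGo (cs : List Char) : String :=
  match cs with
  | [] => "unknown_component"
  | c0 :: rest0 =>
    let cs := c0 :: rest0
    let t := cs.dropWhile bBlank
    match bTry (pyKwClass) t with
    | some name => String.ofList name
    | none =>
      match bTry (pyKwDef) t with
      | some name => String.ofList name
      | none => bGo ((cs.dropWhile (fun c => c ≠ '\n')).drop 1)
termination_by cs.length
decreasing_by
  have h1 := List.length_dropWhile_le (fun c => decide (c ≠ '\n')) (c0 :: rest0)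
  simp only [List.length_drop, List.length_cons] at *
  omega

def extract_component_name_py_alt (component_code : String) : String :=
  bGo component_code.toList

-- ===== PRECONDITION & SPEC =====
def Spec_extract_component_name_py (component_code : String) (out : String) : Prop := out = extract_component_name_py_alt component_code
instance (component_code : String) (out : String) : Decidable (Spec_extract_component_name_py component_code out) := by unfold Spec_extract_component_name_py; infer_instance

-- ===== CLAIM (what is proved, stated in full; the proofs are below) =====
def Claim_equal_extract_component_name_py : Prop := ∀ (component_code : String), Dom_extract_component_name_py component_code → Spec_extract_component_name_py component_code (extract_component_name_py component_code)

-- ===== LEMMAS AND PROOFS =====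

-- ---- generic small facts ----
theorem pvCharEq (c d : Char) : (c = d) ↔ (c.toNat = d.toNat) :=
  ⟨fun h => by rw [h], fun h => Char.ext (UInt32.toNat_inj.mp h)⟩

theorem pvSingletonPrefix (l : List Char) (c : Char) : [c] <+: l ↔ l.head? = some c := by
  constructor
  · rintro ⟨t, rfl⟩; rfl
  · intro h; cases l with
    | nil => simp at h
    | cons a t => simp at h; exact ⟨t, by simp [h]⟩

theorem pvPrefixGetElem? (a b : List Char) (h : a <+: b) (i : Nat) (hi : i < a.length) :
    b[i]? = a[i]? := by
  obtain ⟨t, rfl⟩ := h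
  simp [List.getElem?_append_left hi]

theorem pvDropWhileNeNil (p : Char → Bool) (l : List Char) (h : ∃ c ∈ l, p c = false) :
    l.dropWhile p ≠ [] := by
  intro hnil
  rw [List.dropWhile_eq_nil_iff] at hnil
  obtain ⟨c, hc, hpc⟩ := h
  simpa [hpc] using hnil c hc

theorem pvDropWhileHead (p : Char → Bool) (l tl : List Char) (c : Char)
    (h : l.dropWhile p = c :: tl) : p c = false := by
  induction l with
  | nil => simp at h
  | cons a t ih =>
    by_cases hp : p a
    · rw [List.dropWhile_cons_of_pos hp] at h; exact ih h
    · rw [List.dropWhile_cons_of_neg hp] at h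
      cases h; simpa using hp

theorem pvTakeWhileCongr (p q : Char → Bool) (l : List Char) (h : ∀ c ∈ l, p c = q c) :
    l.takeWhile p = l.takeWhile q := by
  induction l with
  | nil => rfl
  | cons a t ih =>
    have ha := h a (by simp)
    by_cases hp : p a
    · rw [List.takeWhile_cons_of_pos hp, List.takeWhile_cons_of_pos (ha ▸ hp),
        ih (fun c hc => h c (by simp [hc]))]
    · rw [List.takeWhile_cons_of_neg hp, List.takeWhile_cons_of_neg (fun hq => hp (by rw [ha]; exact hq))]

theorem pvDropWhileCongr (p q : Char → Bool) (l : List Char) (h : ∀ c ∈ l, p c = q c) :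
    l.dropWhile p = l.dropWhile q := by
  induction l with
  | nil => rfl
  | cons a t ih =>
    have ha := h a (by simp)
    by_cases hp : p a
    · rw [List.dropWhile_cons_of_pos hp, List.dropWhile_cons_of_pos (ha ▸ hp)]
      exact ih (fun c hc => h c (by simp [hc]))
    · rw [List.dropWhile_cons_of_neg hp, List.dropWhile_cons_of_neg (fun hq => hp (by rw [ha]; exact hq))]

-- takeWhile over an append whose second part starts by failing the predicate
theorem pvTakeWhileAppend (q : Char → Bool) (x v : List Char)
    (hv : v = [] ∨ ∃ c tl, v = c :: tl ∧ q c = false) :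
    (x ++ v).takeWhile q = x.takeWhile q := by
  induction x with
  | nil =>
    rcases hv with rfl | ⟨c, tl, rfl, hc⟩
    · rfl
    · simp [hc]
  | cons a t ih =>
    by_cases hq : q a
    · simp only [List.cons_append, List.takeWhile_cons_of_pos hq, ih]
    · simp only [List.cons_append, List.takeWhile_cons_of_neg hq]

-- dropWhile over an append whose second part starts by failing the predicate
theorem pvDropWhileAppend (q : Char → Bool) (x v : List Char)
    (hv : v = [] ∨ ∃ c tl, v = c :: tl ∧ q c = false) :
    (x ++ v).dropWhile q = x.dropWhile q ++ v := by
  rw [List.dropWhile_append]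
  by_cases he : (x.dropWhile q).isEmpty
  · simp only [he, if_pos]
    rcases hv with rfl | ⟨c, tl, rfl, hc⟩
    · simp_all
    · simp_all
  · simp [he]

-- dropWhile over an append whose FIRST part wholly satisfies the predicate
theorem pvDropWhileAppendAll (q : Char → Bool) (x v : List Char) (hx : ∀ c ∈ x, q c = true) :
    (x ++ v).dropWhile q = v.dropWhile q := by
  rw [List.dropWhile_append]
  have : x.dropWhile q = [] := List.dropWhile_eq_nil_iff.mpr (fun c hc => by simp [hx c hc])
  simp [this]

-- dropWhile over an append whose FIRST part contains a failing element
theorem pvDropWhileAppendEx (q : Char → Bool) (x v : List Char) (hx : ∃ c ∈ x, q c = false) :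
    (x ++ v).dropWhile q = x.dropWhile q ++ v := by
  rw [List.dropWhile_append]
  have h := pvDropWhileNeNil q x hx
  simp [List.isEmpty_iff, h]

-- ---- whitespace bridge on the domain ----
theorem pvBlankBridge (c : Char) (hd : pvDomChar c = true) (hn : c ≠ '\n') :
    PySem.Chars.isspace c = bBlank c := by
  have hn' : c.toNat ≠ 10 := fun h => hn ((pvCharEq c '\n').mpr h)
  simp only [pvDomChar, Bool.or_eq_true, Bool.and_eq_true, decide_eq_true_eq, beq_iff_eq] at hd
  simp only [PySem.Chars.isspace, bBlank, pvCharEq, show (' ' : Char).toNat = 32 from rfl,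
    show ('\t' : Char).toNat = 9 from rfl, show ('\r' : Char).toNat = 13 from rfl]
  rw [Bool.eq_iff_iff]
  simp only [Bool.or_eq_true, Bool.and_eq_true, decide_eq_true_eq]
  omega

-- ---- rstrip decompositions ----
theorem pvRstripDecomp (s : List Char) :
    ∃ v, s = PySem.Chars.rstrip s ++ v ∧ ∀ c ∈ v, PySem.Chars.isspace c = true := by
  refine ⟨(s.reverse.takeWhile PySem.Chars.isspace).reverse, ?_, ?_⟩
  · simp only [PySem.Chars.rstrip, ← List.reverse_append, List.takeWhile_append_dropWhile,
      List.reverse_reverse]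
  · intro c hc
    rw [List.mem_reverse] at hc
    exact List.mem_takeWhile_imp hc

theorem pvRstripAppendSpace (x v : List Char) (hv : ∀ c ∈ v, PySem.Chars.isspace c = true) :
    PySem.Chars.rstrip (x ++ v) = PySem.Chars.rstrip x := by
  simp only [PySem.Chars.rstrip, List.reverse_append]
  rw [pvDropWhileAppendAll _ _ _ (fun c hc => hv c (List.mem_reverse.mp hc))]

theorem pvRstripAppendWord (x r : List Char) (hr : ∃ c ∈ r, PySem.Chars.isspace c = false) :
    PySem.Chars.rstrip (x ++ r) = x ++ PySem.Chars.rstrip r := by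
  simp only [PySem.Chars.rstrip, List.reverse_append]
  obtain ⟨c, hc, hpc⟩ := hr
  rw [pvDropWhileAppendEx _ _ _ ⟨c, List.mem_reverse.mpr hc, hpc⟩]
  simp

theorem pvStripEq (l : List Char) :
    PySem.Chars.strip l = PySem.Chars.rstrip (l.dropWhile PySem.Chars.isspace) := rfl

-- ---- split₀ machinery ----
theorem pvSplit0Acc (l : List Char) : ∀ (cur : List Char) (acc : List (List Char)),
    PySem.Chars.split₀.go l cur acc = acc.reverse ++ PySem.Chars.split₀.go l cur [] := by
  induction l with
  | nil =>
    intro cur acc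
    by_cases hc : cur.isEmpty <;> simp [PySem.Chars.split₀.go, hc]
  | cons a t ih =>
    intro cur acc
    by_cases hs : PySem.Chars.isspace a
    · by_cases hc : cur.isEmpty
      · simp only [PySem.Chars.split₀.go, hs, hc, if_pos]
        exact ih [] acc
      · simp only [PySem.Chars.split₀.go, hs, hc, if_true, if_false, Bool.false_eq_true]
        rw [ih [] (cur.reverse :: acc), ih [] [cur.reverse]]
        simp
    · simp only [PySem.Chars.split₀.go, hs, Bool.false_eq_true, if_false]
      exact ih (a :: cur) acc

-- head of split₀.go with a nonempty current word
theorem pvSplit0Word (l : List Char) : ∀ (cur : List Char), cur ≠ [] →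
    ∃ tl, PySem.Chars.split₀.go l cur []
      = (cur.reverse ++ l.takeWhile (fun c => !PySem.Chars.isspace c)) :: tl := by
  induction l with
  | nil =>
    intro cur hc
    refine ⟨[], ?_⟩
    simp [PySem.Chars.split₀.go, List.isEmpty_iff, hc]
  | cons a t ih =>
    intro cur hc
    by_cases hs : PySem.Chars.isspace a
    · refine ⟨PySem.Chars.split₀.go t [] [], ?_⟩
      simp only [PySem.Chars.split₀.go, hs, List.isEmpty_iff, hc, if_true, if_false]
      rw [pvSplit0Acc]
      simp [hs]
    · obtain ⟨tl, htl⟩ := ih (a :: cur) (by simp)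
      refine ⟨tl, ?_⟩
      simp only [PySem.Chars.split₀.go, hs, Bool.false_eq_true, if_false]
      rw [htl]
      simp [hs]

-- first word of split₀
theorem pvSplit0Head (s : List Char) (h : s.dropWhile PySem.Chars.isspace ≠ []) :
    ∃ tl, PySem.Chars.split₀ s
      = ((s.dropWhile PySem.Chars.isspace).takeWhile (fun c => !PySem.Chars.isspace c)) :: tl := by
  induction s with
  | nil => simp at h
  | cons a t ih =>
    by_cases hs : PySem.Chars.isspace a
    · rw [List.dropWhile_cons_of_pos hs] at h ⊢
      obtain ⟨tl, htl⟩ := ih h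
      refine ⟨tl, ?_⟩
      rw [← htl]
      simp [PySem.Chars.split₀, PySem.Chars.split₀.go, hs]
    · rw [List.dropWhile_cons_of_neg hs]
      have : PySem.Chars.split₀ (a :: t) = PySem.Chars.split₀.go t [a] [] := by
        simp [PySem.Chars.split₀, PySem.Chars.split₀.go, hs]
      obtain ⟨tl, htl⟩ := pvSplit0Word t [a] (by simp)
      refine ⟨tl, ?_⟩
      rw [this, htl]
      simp [hs]

-- consuming a concrete keyword: split₀ ("class " ++ x) and split₀ ("def " ++ x)
theorem pvSplit0Class (x : List Char) :
    PySem.Chars.split₀ ('c'::'l'::'a'::'s'::'s'::' '::x) = ['c','l','a','s','s'] :: PySem.Chars.split₀ x := by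
  show PySem.Chars.split₀.go _ [] [] = _
  simp only [PySem.Chars.split₀.go, show PySem.Chars.isspace 'c' = false from rfl,
    show PySem.Chars.isspace 'l' = false from rfl, show PySem.Chars.isspace 'a' = false from rfl,
    show PySem.Chars.isspace 's' = false from rfl, show PySem.Chars.isspace ' ' = true from rfl,
    Bool.false_eq_true, if_false, if_true, List.isEmpty_cons]
  rw [pvSplit0Acc]
  rfl

theorem pvSplit0Def (x : List Char) :
    PySem.Chars.split₀ ('d'::'e'::'f'::' '::x) = ['d','e','f'] :: PySem.Chars.split₀ x := by
  show PySem.Chars.split₀.go _ [] [] = _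
  simp only [PySem.Chars.split₀.go, show PySem.Chars.isspace 'd' = false from rfl,
    show PySem.Chars.isspace 'e' = false from rfl, show PySem.Chars.isspace 'f' = false from rfl,
    show PySem.Chars.isspace ' ' = true from rfl,
    Bool.false_eq_true, if_false, if_true, List.isEmpty_cons]
  rw [pvSplit0Acc]
  rfl

-- ---- splitOn with a one-char separator ----
-- reference shape
def pvSplit1 (c : Char) (s : List Char) : List (List Char) :=
  match _hdw : s.dropWhile (fun x => x ≠ c) with
  | [] => [s.takeWhile (fun x => x ≠ c)]
  | _ :: tl => s.takeWhile (fun x => x ≠ c) :: pvSplit1 c tl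
termination_by s.length
decreasing_by
  have h1 := List.length_dropWhile_le (fun x => decide (x ≠ c)) s
  rw [_hdw] at h1; simp at h1; omega

theorem pvSplit1Unfold (c : Char) (s : List Char) :
    pvSplit1 c s = s.takeWhile (fun x => x ≠ c)
      :: (match s.dropWhile (fun x => x ≠ c) with
          | [] => []
          | _ :: tl => pvSplit1 c tl) := by
  rw [pvSplit1]
  rcases hd : List.dropWhile (fun x => decide (x ≠ c)) s with _ | ⟨a, tl⟩ <;> simp [hd]

theorem pvSplitOnGo (c : Char) : ∀ (fuel : Nat) (l cur : List Char) (acc : List (List Char)),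
    l.length ≤ fuel →
    PySem.Chars.splitOn.go [c] fuel l cur acc
      = acc.reverse ++ (cur.reverse ++ l.takeWhile (fun x => x ≠ c))
          :: (match l.dropWhile (fun x => x ≠ c) with
              | [] => []
              | _ :: tl => pvSplit1 c tl) := by
  intro fuel
  induction fuel with
  | zero =>
    intro l cur acc hl
    have hnil : l = [] := by cases l <;> simp_all
    subst hnil
    simp [PySem.Chars.splitOn.go]
  | succ fuel ih =>
    intro l cur acc hl
    cases l with
    | nil => simp [PySem.Chars.splitOn.go]
    | cons ch rest =>
      by_cases hc : ch = c
      · subst hc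
        have hpre : List.isPrefixOf [ch] (ch :: rest) = true := by simp [List.isPrefixOf]
        simp only [PySem.Chars.splitOn.go, hpre, if_true, List.length_singleton,
          List.drop_succ_cons, List.drop_zero]
        rw [ih rest [] (cur.reverse :: acc) (by simpa using hl)]
        rw [List.takeWhile_cons_of_neg (by simp), List.dropWhile_cons_of_neg (by simp)]
        simp [pvSplit1Unfold ch rest]
      · have hpre : List.isPrefixOf [c] (ch :: rest) = false := by
          simp [List.isPrefixOf]; exact fun h => (hc h.symm).elim
        simp only [PySem.Chars.splitOn.go, hpre, Bool.false_eq_true, if_false]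
        rw [ih rest (ch :: cur) acc (by simpa using hl)]
        rw [List.takeWhile_cons_of_pos (by simp [hc]), List.dropWhile_cons_of_pos (by simp [hc])]
        simp

theorem pvSplitOnEq (c : Char) (s : List Char) :
    PySem.Chars.splitOn s [c] = pvSplit1 c s := by
  show PySem.Chars.splitOn.go [c] (s.length + 1) s [] [] = _
  rw [pvSplitOnGo c (s.length + 1) s [] [] (by omega), pvSplit1Unfold c s]
  simp

theorem pvSplitOnHead (t : List Char) (c : Char) :
    (PySem.Chars.splitOn t [c]).headD [] = t.takeWhile (fun x => x ≠ c) := by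
  rw [pvSplitOnEq]
  unfold pvSplit1
  split <;> simp

-- ---- name.find('(') / name[:p] = takeWhile (≠ '(') ----
theorem pvTakeEqTakeWhile (l : List Char) (k : Nat) (hk : l[k]? = some '(')
    (h : ∀ i, i < k → l[i]? ≠ some '(') : l.take k = l.takeWhile (fun x => x ≠ '(') := by
  induction l generalizing k with
  | nil => simp at hk
  | cons a t ih =>
    cases k with
    | zero =>
      simp only [List.getElem?_cons_zero, Option.some_inj] at hk
      simp [List.take, hk]
    | succ k =>
      have h0 := h 0 (by omega)
      simp only [List.getElem?_cons_zero, ne_eq, Option.some_inj] at h0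
      simp only [List.getElem?_cons_succ] at hk
      rw [List.take_succ_cons, List.takeWhile_cons_of_pos (by simpa using h0),
        ih k hk (fun i hi => by simpa using h (i+1) (by omega))]

theorem pvCut (name : List Char) :
    (if PySem.Chars.find name ['('] < 0 then name
     else name.take (PySem.Chars.find name ['(']).toNat)
      = name.takeWhile (fun x => x ≠ '(') := by
  by_cases hneg : PySem.Chars.find name ['('] < 0
  · have h1 := PySem.Chars.neg_one_le_find (s := name) (sub := ['('])
    have he : PySem.Chars.find name ['('] = -1 := by omega
    have hni : ¬ (['('] <:+: name) := (PySem.Chars.find_eq_neg_one_iff _ _).mp he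
    rw [List.singleton_infix_iff] at hni
    rw [if_pos hneg, List.takeWhile_eq_self_iff.mpr (fun c hc => by
      simp only [decide_eq_true_eq]; rintro rfl; exact hni hc)]
  · rw [if_neg hneg]
    push Not at hneg
    obtain ⟨hpre, hmin⟩ := PySem.Chars.find_spec (s := name) (sub := ['(']) hneg
    apply pvTakeEqTakeWhile
    · have := (pvSingletonPrefix _ _).mp hpre
      rwa [List.head?_drop] at this
    · intro i hi
      have hm := hmin i hi
      rw [pvSingletonPrefix, List.head?_drop] at hm
      exact hm

-- ---- keyword prefix through the line border ----
theorem pvPrefixBorder (kw lt rest0 : List Char) (hkw : '\n' ∉ kw)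
    (hr : rest0 = [] ∨ ∃ tl, rest0 = '\n' :: tl) :
    kw.isPrefixOf (lt ++ rest0) = kw.isPrefixOf lt := by
  rcases hr with rfl | ⟨tl, rfl⟩
  · simp
  · rw [Bool.eq_iff_iff, List.isPrefixOf_iff_prefix, List.isPrefixOf_iff_prefix]
    constructor
    · intro hp
      by_cases hlen : kw.length ≤ lt.length
      · exact (List.isPrefix_append_of_length hlen).mp hp
      · exfalso
        push Not at hlen
        have hk : kw[lt.length]? = some '\n' := by
          rw [← pvPrefixGetElem? kw _ hp lt.length hlen,
            List.getElem?_append_right (le_refl _)]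
          simp
        exact hkw (List.mem_of_getElem? hk)
    · exact fun hp => hp.trans (List.prefix_append _ _)

-- ---- the per-line, per-keyword lemma ----
theorem pvKwLemma (kw0 : List Char)
    (hkw : ∀ c ∈ kw0, PySem.Chars.isspace c = false ∧ c ≠ '\n')
    (line rest0 : List Char) (hdom : ∀ c ∈ line, pvDomChar c = true) (hnl : '\n' ∉ line)
    (hr : rest0 = [] ∨ ∃ tl, rest0 = '\n' :: tl)
    (hsplit_kw : ∀ x, PySem.Chars.split₀ ((kw0 ++ [' ']) ++ x) = kw0 :: PySem.Chars.split₀ x)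
    (hrstrip_kw : PySem.Chars.rstrip (kw0 ++ [' ']) = kw0) :
    bTry (kw0 ++ [' ']) (line.dropWhile bBlank ++ rest0)
      = (if PySem.Chars.startswith (PySem.Chars.strip line) (kw0 ++ [' '])
         then some (pyExtractTok (PySem.Chars.strip line)) else none) := by
  have hkwnl : '\n' ∉ kw0 ++ [' '] := by
    intro h
    rcases List.mem_append.mp h with h | h
    · exact (hkw _ h).2 rfl
    · simp at h
  have hbridge : ∀ c ∈ line, PySem.Chars.isspace c = bBlank c := fun c hc =>
    pvBlankBridge c (hdom c hc) (fun he => hnl (he ▸ hc))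
  have hlt : line.dropWhile bBlank = line.dropWhile PySem.Chars.isspace :=
    (pvDropWhileCongr _ _ line hbridge).symm
  have hltsub : ∀ c ∈ line.dropWhile bBlank, c ∈ line := fun c hc =>
    List.dropWhile_subset _ hc
  have hstrip : PySem.Chars.strip line = PySem.Chars.rstrip (line.dropWhile bBlank) := by
    rw [pvStripEq, hlt]
  unfold bTry
  dsimp only
  rw [pvPrefixBorder (kw0 ++ [' ']) (line.dropWhile bBlank) rest0 hkwnl hr]
  by_cases hpf : (kw0 ++ [' ']).isPrefixOf (line.dropWhile bBlank)
  · -- the keyword matches at the start of the stripped line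
    obtain ⟨r, hr_eq⟩ := List.isPrefixOf_iff_prefix.mp hpf
    have hrsub : ∀ c ∈ r, c ∈ line := fun c hc => hltsub c (by rw [← hr_eq]; simp [hc])
    have hdrop : (line.dropWhile bBlank ++ rest0).drop (kw0 ++ [' ']).length = r ++ rest0 := by
      rw [← hr_eq, List.append_assoc, List.drop_left]
    rw [if_pos hpf, hdrop]
    by_cases hcase : ∃ c ∈ r, PySem.Chars.isspace c = false
    · -- a real word follows the keyword: both sides return it (cut at '(')
      have hcaseb : ∃ c ∈ r, bBlank c = false := by
        obtain ⟨c0, hc0, hs0⟩ := hcase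
        exact ⟨c0, hc0, by rw [← hbridge c0 (hrsub c0 hc0)]; exact hs0⟩
      have hstw : PySem.Chars.strip line = (kw0 ++ [' ']) ++ PySem.Chars.rstrip r := by
        rw [hstrip, ← hr_eq, pvRstripAppendWord _ _ hcase]
      have hguard : PySem.Chars.startswith (PySem.Chars.strip line) (kw0 ++ [' ']) = true := by
        rw [hstw]
        exact List.isPrefixOf_iff_prefix.mpr (List.prefix_append _ _)
      rw [if_pos hguard]
      -- decompose r = rstrip r ++ v with v all-space
      obtain ⟨v, hv_eq, hv⟩ := pvRstripDecomp r
      have hvshape : v = [] ∨ ∃ c tl, v = c :: tl ∧ (!PySem.Chars.isspace c) = false := by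
        cases v with
        | nil => exact Or.inl rfl
        | cons a tl => exact Or.inr ⟨a, tl, rfl, by simp [hv a (by simp)]⟩
      have hwit : ∃ c ∈ PySem.Chars.rstrip r, PySem.Chars.isspace c = false := by
        obtain ⟨c0, hc0, hs0⟩ := hcase
        rcases List.mem_append.mp (hv_eq ▸ hc0) with h | h
        · exact ⟨c0, h, hs0⟩
        · rw [hv c0 h] at hs0; cases hs0
      -- A's token
      have hne' : (PySem.Chars.rstrip r).dropWhile PySem.Chars.isspace ≠ [] :=
        pvDropWhileNeNil _ _ hwit
      obtain ⟨tl, htl⟩ := pvSplit0Head (PySem.Chars.rstrip r) hne'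
      have htokA : pyExtractTok (PySem.Chars.strip line)
          = (((PySem.Chars.rstrip r).dropWhile PySem.Chars.isspace).takeWhile
              (fun c => !PySem.Chars.isspace c)).takeWhile (fun x => x ≠ '(') := by
        unfold pyExtractTok
        rw [hstw, hsplit_kw, htl]
        exact pvSplitOnHead _ _
      -- first word is unchanged by rstrip
      have hfw : ((PySem.Chars.rstrip r).dropWhile PySem.Chars.isspace).takeWhile
            (fun c => !PySem.Chars.isspace c)
          = (r.dropWhile PySem.Chars.isspace).takeWhile (fun c => !PySem.Chars.isspace c) := by
        conv_rhs => rw [hv_eq]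
        rw [pvDropWhileAppendEx _ _ _ hwit, pvTakeWhileAppend _ _ _ hvshape]
      -- B's side
      have hrr : (r ++ rest0).dropWhile bBlank = r.dropWhile bBlank ++ rest0 :=
        pvDropWhileAppendEx _ _ _ hcaseb
      rw [hrr]
      have hrb : r.dropWhile bBlank = r.dropWhile PySem.Chars.isspace :=
        (pvDropWhileCongr _ _ r (fun c hc => hbridge c (hrsub c hc))).symm
      have hq : ∀ c ∈ r.dropWhile bBlank, (!(bBlank c || c = '\n')) = (!PySem.Chars.isspace c) := by
        intro c hc
        have hcl : c ∈ line := hrsub c (List.dropWhile_subset _ hc)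
        have : ¬ c = '\n' := fun he => hnl (he ▸ hcl)
        simp [this, hbridge c hcl]
      have hname : (r.dropWhile bBlank ++ rest0).takeWhile (fun c => !(bBlank c || c = '\n'))
          = (r.dropWhile PySem.Chars.isspace).takeWhile (fun c => !PySem.Chars.isspace c) := by
        rw [pvTakeWhileAppend _ _ _ (by
          rcases hr with rfl | ⟨tl2, rfl⟩
          · exact Or.inl rfl
          · exact Or.inr ⟨'\n', tl2, rfl, by decide⟩)]
        rw [pvTakeWhileCongr _ _ _ hq, hrb]
      rw [hname]
      -- the word is nonempty
      have hxne : r.dropWhile PySem.Chars.isspace ≠ [] :=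
        pvDropWhileNeNil _ _ hcase
      obtain ⟨c1, x', hx⟩ : ∃ c1 x', r.dropWhile PySem.Chars.isspace = c1 :: x' := by
        cases hxx : r.dropWhile PySem.Chars.isspace with
        | nil => exact absurd hxx hxne
        | cons a b => exact ⟨a, b, rfl⟩
      have hc1 : PySem.Chars.isspace c1 = false := pvDropWhileHead _ _ _ _ hx
      have hnonempty : ((r.dropWhile PySem.Chars.isspace).takeWhile
          (fun c => !PySem.Chars.isspace c)).isEmpty = false := by
        rw [hx, List.takeWhile_cons_of_pos (by simp [hc1])]
        rfl
      rw [if_neg (by simp [hnonempty])]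
      rw [htokA, hfw, pvCut]
    · -- only whitespace follows the keyword: no token, and A's guard is false too
      have hall : ∀ c ∈ r, PySem.Chars.isspace c = true := by
        intro c hc
        by_contra h
        exact hcase ⟨c, hc, by simpa using h⟩
      have hallb : ∀ c ∈ r, bBlank c = true := fun c hc =>
        (hbridge c (hrsub c hc)) ▸ hall c hc
      have hrr : (r ++ rest0).dropWhile bBlank = rest0 := by
        rw [pvDropWhileAppendAll _ _ _ hallb]
        rcases hr with rfl | ⟨tl2, rfl⟩
        · rfl
        · rw [List.dropWhile_cons_of_neg (by decide)]
      rw [hrr]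
      have hname : rest0.takeWhile (fun c => !(bBlank c || c = '\n')) = [] := by
        rcases hr with rfl | ⟨tl2, rfl⟩
        · rfl
        · rw [List.takeWhile_cons_of_neg (by decide)]
      rw [hname, if_pos List.isEmpty_nil]
      have hstk : PySem.Chars.strip line = kw0 := by
        rw [hstrip, ← hr_eq, pvRstripAppendSpace _ _ hall, hrstrip_kw]
      have hguard : PySem.Chars.startswith (PySem.Chars.strip line) (kw0 ++ [' ']) = false := by
        rw [hstk]
        by_contra h
        simp only [Bool.not_eq_false] at h
        have hl := (List.isPrefixOf_iff_prefix.mp h).length_le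
        simp at hl
      rw [if_neg (by simp [hguard])]
  · -- keyword does not start the stripped line
    rw [if_neg hpf]
    have hguard : PySem.Chars.startswith (PySem.Chars.strip line) (kw0 ++ [' ']) = false := by
      by_contra h
      simp only [Bool.not_eq_false] at h
      apply hpf
      obtain ⟨v, hv_eq, _⟩ := pvRstripDecomp (line.dropWhile bBlank)
      have h1 : (kw0 ++ [' ']) <+: PySem.Chars.strip line := List.isPrefixOf_iff_prefix.mp h
      rw [hstrip] at h1
      exact List.isPrefixOf_iff_prefix.mpr (h1.trans ⟨v, hv_eq.symm⟩)
    rw [if_neg (by simp [hguard])]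

-- ---- main induction ----
theorem bGoCons (c0 : Char) (crest : List Char) :
    bGo (c0 :: crest)
      = (match bTry (pyKwClass) ((c0 :: crest).dropWhile bBlank) with
         | some name => String.ofList name
         | none =>
           match bTry (pyKwDef) ((c0 :: crest).dropWhile bBlank) with
           | some name => String.ofList name
           | none => bGo (((c0 :: crest).dropWhile (fun c => c ≠ '\n')).drop 1)) := by
  rw [bGo]

set_option maxRecDepth 8192 in
theorem pvMainAux : ∀ (n : Nat) (cs : List Char), cs.length ≤ n →
    (∀ c ∈ cs, pvDomChar c = true) → bGo cs = aGo (pvSplit1 '\n' cs) := by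
  intro n
  induction n with
  | zero =>
    intro cs hlen _
    have : cs = [] := by cases cs <;> simp_all
    subst this
    rw [pvSplit1Unfold]
    simp [bGo, aGo, pyKwClass, pyKwDef, PySem.Chars.strip, PySem.Chars.lstrip,
      PySem.Chars.rstrip, PySem.Chars.startswith]
  | succ n ih =>
    intro cs hlen hdom
    cases cs with
    | nil =>
      rw [pvSplit1Unfold]
      simp [bGo, aGo, pyKwClass, pyKwDef, PySem.Chars.strip, PySem.Chars.lstrip,
        PySem.Chars.rstrip, PySem.Chars.startswith]
    | cons c0 crest =>
      have hcs : (c0 :: crest).takeWhile (fun c => c ≠ '\n')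
          ++ (c0 :: crest).dropWhile (fun c => c ≠ '\n') = c0 :: crest :=
        List.takeWhile_append_dropWhile
      have hnl : '\n' ∉ (c0 :: crest).takeWhile (fun c => c ≠ '\n') := fun h => by
        simpa using List.mem_takeWhile_imp h
      have hrshape : (c0 :: crest).dropWhile (fun c => c ≠ '\n') = []
          ∨ ∃ tl, (c0 :: crest).dropWhile (fun c => c ≠ '\n') = '\n' :: tl := by
        cases hre : (c0 :: crest).dropWhile (fun c => c ≠ '\n') with
        | nil => exact Or.inl rfl
        | cons a tl =>
          have ha := pvDropWhileHead _ _ _ _ hre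
          simp only [decide_eq_false_iff_not, not_not] at ha
          subst ha
          exact Or.inr ⟨tl, rfl⟩
      have hdl : ∀ c ∈ (c0 :: crest).takeWhile (fun c => c ≠ '\n'), pvDomChar c = true :=
        fun c hc => hdom c (List.takeWhile_subset _ hc)
      have ht : (c0 :: crest).dropWhile bBlank
          = ((c0 :: crest).takeWhile (fun c => c ≠ '\n')).dropWhile bBlank
            ++ (c0 :: crest).dropWhile (fun c => c ≠ '\n') := by
        conv_lhs => rw [← hcs]
        refine pvDropWhileAppend bBlank _ _ ?_
        rcases hrshape with h | ⟨tl, h⟩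
        · exact Or.inl h
        · exact Or.inr ⟨'\n', tl, h, by decide⟩
      rw [bGoCons, ht]
      rw [show (pyKwClass) = ['c','l','a','s','s'] ++ [' '] from rfl,
        show (pyKwDef) = ['d','e','f'] ++ [' '] from rfl]
      rw [pvKwLemma ['c','l','a','s','s']
        (by intro c hc; fin_cases hc <;> exact ⟨rfl, by decide⟩) _ _ hdl hnl hrshape
        (fun x => pvSplit0Class x) rfl]
      rw [pvKwLemma ['d','e','f']
        (by intro c hc; fin_cases hc <;> exact ⟨rfl, by decide⟩) _ _ hdl hnl hrshape
        (fun x => pvSplit0Def x) rfl]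
      rw [pvSplit1Unfold, aGo]
      rw [show (pyKwClass) = ['c','l','a','s','s'] ++ [' '] from rfl,
        show (pyKwDef) = ['d','e','f'] ++ [' '] from rfl]
      by_cases hg1 : PySem.Chars.startswith
          (PySem.Chars.strip ((c0 :: crest).takeWhile (fun c => c ≠ '\n')))
          (['c','l','a','s','s'] ++ [' ']) = true
      · rw [if_pos hg1, if_pos hg1]
      · rw [if_neg hg1, if_neg hg1]
        by_cases hg2 : PySem.Chars.startswith
            (PySem.Chars.strip ((c0 :: crest).takeWhile (fun c => c ≠ '\n')))
            (['d','e','f'] ++ [' ']) = true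
        · rw [if_pos hg2, if_pos hg2]
        · rw [if_neg hg2, if_neg hg2]
          rcases hrshape with h | ⟨tl, h⟩
          · rw [h]
            simp [bGo, aGo]
          · rw [h]
            have hlt : tl.length ≤ n := by
              have h1 := List.length_dropWhile_le (fun c => decide (c ≠ '\n')) (c0 :: crest)
              rw [h] at h1
              simp only [List.length_cons] at h1 hlen
              omega
            have hdt : ∀ c ∈ tl, pvDomChar c = true := fun c hc =>
              hdom c (List.dropWhile_subset _ (by rw [h]; simp [hc]))
            simpa using ih tl hlt hdt

theorem pvMain (cs : List Char) (hdom : ∀ c ∈ cs, pvDomChar c = true) :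
    bGo cs = aGo (pvSplit1 '\n' cs) :=
  pvMainAux cs.length cs (le_refl _) hdom

-- ===== VERDICT (by name: the statement is the Claim_ definition above) =====
theorem extract_component_name_py_spec : Claim_equal_extract_component_name_py := by
  intro s hdom
  unfold Spec_extract_component_name_py extract_component_name_py extract_component_name_py_alt
  rw [pvSplitOnEq]
  have hd : ∀ c ∈ s.toList, pvDomChar c = true := by
    have h := hdom
    unfold Dom_extract_component_name_py pvDomStr at h
    simpa [List.all_eq_true] using h
  exact (pvMain s.toList hd).symm
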